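-- pv_equiv track=rewrite | github.com/aniruddh47/ai-voice-agent | backend/utils/chunking.py | build_meaningful_chunks
-- ===== SOURCE A (Python) =====
-- from typing import Any, Dict, List
--
-- def build_meaningful_chunks(sentences: List[str], min_sentences: int = 2, max_sentences: int = 4) -> List[str]:
--     chunks: List[str] = []
--     buf: List[str] = []
--
--     for sentence in sentences:
--         buf.append(sentence)
--         if len(buf) >= max_sentences:
--             chunks.append(" ".join(buf).strip())
--             buf = []
--
--     if buf:
--         if chunks and len(buf) < min_sentences:
--             chunks[-1] = f"{chunks[-1]} {' '.join(buf)}".strip()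
--         else:
--             chunks.append(" ".join(buf).strip())
--
--     return [c for c in chunks if c]
-- ===== SOURCE B (Python) =====
-- def build_meaningful_chunks(sentences, min_sentences=2, max_sentences=4):
--     # Batch-first decomposition: slice fixed-size groups, map to chunk strings,
--     # then a separate tail-merge pass (instead of A's streaming accumulator).
--     step = max_sentences if max_sentences > 1 else 1
--     groups = []
--     rest = sentences
--     while rest:
--         groups.append(rest[:step])
--         rest = rest[step:]
--     chunks = [" ".join(g).strip() for g in groups]
--     if len(groups) > 1 and len(groups[-1]) < max_sentences and len(groups[-1]) < min_sentences:
--         merged = f"{chunks[-2]} {' '.join(groups[-1])}".strip()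
--         chunks = chunks[:-2] + [merged]
--     return [c for c in chunks if c]
-- ===== Notes on version B (the rewrite author's own statement) =====
-- stated objective: alternative
-- what changed: Replaces A's streaming sentence-by-sentence accumulator (buffer flushed on overflow, tail patched into the last chunk) with a batch-first pipeline: slice the list into fixed-size groups, map each group to its chunk string, and run one separate tail-merge pass.
import Mathlib
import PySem

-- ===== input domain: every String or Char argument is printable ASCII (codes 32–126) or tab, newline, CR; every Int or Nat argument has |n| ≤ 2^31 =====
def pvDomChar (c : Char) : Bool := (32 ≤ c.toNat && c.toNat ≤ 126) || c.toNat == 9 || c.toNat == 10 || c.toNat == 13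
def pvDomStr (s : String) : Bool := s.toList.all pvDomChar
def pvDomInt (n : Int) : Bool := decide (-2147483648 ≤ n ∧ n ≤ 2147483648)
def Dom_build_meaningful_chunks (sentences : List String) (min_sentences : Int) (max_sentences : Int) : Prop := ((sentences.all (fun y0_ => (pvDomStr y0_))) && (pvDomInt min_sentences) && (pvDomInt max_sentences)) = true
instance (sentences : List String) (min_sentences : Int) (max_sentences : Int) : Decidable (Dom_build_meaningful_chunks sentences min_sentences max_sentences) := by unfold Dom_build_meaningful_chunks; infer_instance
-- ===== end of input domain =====

-- B replaces A's streaming accumulator with a batch-first pipeline (fixed-size groups, map to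
-- chunk strings, separate tail-merge pass); alternative decomposition, same cost.

-- ===== PORT A =====
-- ' '.join(bs).strip()  (appears verbatim in both Pythons)
def pvChunk (bs : List String) : String := PySem.Str.strip (PySem.Str.join " " bs)

-- one iteration of A's for-loop over the state (chunks, buf)
def pvStepA (max_sentences : Int) (st : List String × List String) (s : String) :
    List String × List String :=
  let buf := st.2 ++ [s]
  if (buf.length : Int) ≥ max_sentences then (st.1 ++ [pvChunk buf], []) else (st.1, buf)

def build_meaningful_chunks (sentences : List String) (min_sentences : Int)
    (max_sentences : Int) : List String :=
  let st := sentences.foldl (pvStepA max_sentences) ([], [])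
  let chunks := st.1
  let buf := st.2
  let chunks :=
    if buf ≠ [] then
      if chunks ≠ [] ∧ (buf.length : Int) < min_sentences then
        -- chunks[-1] = f"{chunks[-1]} {' '.join(buf)}".strip()   (chunks is nonempty here)
        chunks.set (chunks.length - 1)
          (PySem.Str.strip (chunks.getLastD "" ++ " " ++ PySem.Str.join " " buf))
      else chunks ++ [pvChunk buf]
    else chunks
  chunks.filter (fun c => c ≠ "")

-- ===== PORT B =====
-- B's while loop: groups.append(rest[:step]); rest = rest[step:] — the slices rest[:k]/rest[k:]
-- with k = step.toNat ≥ 1 are exactly take/drop (PySem.List.slice_to / slice_from, 0 ≤ step)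
def pvGroups (k : Nat) : List String → List (List String)
  | [] => []
  | s :: rest => (s :: rest).take k :: pvGroups k (rest.drop (k - 1))
  termination_by rest => rest.length
  decreasing_by simp

def build_meaningful_chunks_alt (sentences : List String) (min_sentences : Int)
    (max_sentences : Int) : List String :=
  let step : Int := if max_sentences > 1 then max_sentences else 1
  let g := pvGroups step.toNat sentences
  let chunks := g.map pvChunk
  let chunks :=
    if 1 < g.length ∧ (((g.getLastD []).length : Int) < max_sentences
        ∧ ((g.getLastD []).length : Int) < min_sentences) then
      -- chunks = chunks[:-2] + [f"{chunks[-2]} {' '.join(groups[-1])}".strip()]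
      chunks.take (chunks.length - 2) ++
        [PySem.Str.strip (chunks.getD (chunks.length - 2) "" ++ " " ++
          PySem.Str.join " " (g.getLastD []))]
    else chunks
  chunks.filter (fun c => c ≠ "")

-- ===== PRECONDITION & SPEC =====
def Spec_build_meaningful_chunks (sentences : List String) (min_sentences : Int) (max_sentences : Int) (out : List String) : Prop := out = build_meaningful_chunks_alt sentences min_sentences max_sentences
instance (sentences : List String) (min_sentences : Int) (max_sentences : Int) (out : List String) : Decidable (Spec_build_meaningful_chunks sentences min_sentences max_sentences out) := by unfold Spec_build_meaningful_chunks; infer_instance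

-- ===== CLAIM (what is proved, stated in full; the proofs are below) =====
def Claim_equal_build_meaningful_chunks : Prop := ∀ (sentences : List String) (min_sentences : Int) (max_sentences : Int), Dom_build_meaningful_chunks sentences min_sentences max_sentences → Spec_build_meaningful_chunks sentences min_sentences max_sentences (build_meaningful_chunks sentences min_sentences max_sentences)

-- ===== LEMMAS AND PROOFS =====

-- the common group size: B's `step`, and the buffer length at which A flushes
def pvK (max_sentences : Int) : Nat := (if max_sentences > 1 then max_sentences else 1).toNat

theorem pvK_pos (m : Int) : 1 ≤ pvK m := by
  unfold pvK; split_ifs <;> omega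

-- A's flush test `len(buf) >= max_sentences`, for a nonempty buffer, is `pvK ≤ len(buf)`
theorem pvCond_iff (m : Int) (L : Nat) (hL : 1 ≤ L) : ((L : Int) ≥ m) ↔ pvK m ≤ L := by
  unfold pvK; split_ifs with h <;> omega

theorem pvGroups_nil_iff (k : Nat) (xs : List String) : pvGroups k xs = [] ↔ xs = [] := by
  cases xs <;> simp [pvGroups]

theorem pvGroups_cons (k : Nat) (hk : 1 ≤ k) (xs : List String) (h : xs ≠ []) :
    pvGroups k xs = xs.take k :: pvGroups k (xs.drop k) := by
  cases xs with
  | nil => exact absurd rfl h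
  | cons s rest =>
    have : (s :: rest).drop k = rest.drop (k - 1) := by
      obtain ⟨k', rfl⟩ : ∃ k', k = k' + 1 := ⟨k - 1, by omega⟩
      simp
    rw [pvGroups, this]

-- every group B builds is a nonempty slice
theorem pvGroups_ne_nil (k : Nat) (hk : 1 ≤ k) :
    ∀ xs : List String, ∀ b ∈ pvGroups k xs, b ≠ [] := by
  intro xs
  induction xs using pvGroups.induct k with
  | case1 => simp [pvGroups]
  | case2 s rest ih =>
    intro b hb
    rw [pvGroups] at hb
    rcases List.mem_cons.mp hb with h | h
    · subst h; simp; omega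
    · exact ih b h

theorem foldA_small (m : Int) (xs : List String) :
    ∀ buf cs, buf.length + xs.length < pvK m →
      xs.foldl (pvStepA m) (cs, buf) = (cs, buf ++ xs) := by
  induction xs with
  | nil => intro buf cs _; simp
  | cons s rest ih =>
    intro buf cs h
    have hc : ¬ (((buf ++ [s]).length : Int) ≥ m) := by
      rw [pvCond_iff m _ (by simp)]
      simp only [List.length_append, List.length_cons, List.length_nil]
      simp at h ⊢; omega
    rw [List.foldl_cons]
    show rest.foldl (pvStepA m) (pvStepA m (cs, buf) s) = _
    rw [pvStepA]; simp only [hc, if_false]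
    rw [ih (buf ++ [s]) cs (by simp at h ⊢; omega)]
    simp

theorem foldA_fill (m : Int) (xs : List String) :
    ∀ buf cs, pvK m ≤ buf.length + xs.length → buf.length < pvK m →
      xs.foldl (pvStepA m) (cs, buf) =
        (xs.drop (pvK m - buf.length)).foldl (pvStepA m)
          (cs ++ [pvChunk (buf ++ xs.take (pvK m - buf.length))], []) := by
  induction xs with
  | nil => intro buf cs h1 h2; simp at h1; omega
  | cons s rest ih =>
    intro buf cs h1 h2
    rw [List.foldl_cons]
    show rest.foldl (pvStepA m) (pvStepA m (cs, buf) s) = _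
    by_cases hk : pvK m = buf.length + 1
    · have hc : (((buf ++ [s]).length : Int) ≥ m) := by
        rw [pvCond_iff m _ (by simp)]; simp; omega
      rw [pvStepA]; simp only [hc, if_pos]
      have h3 : pvK m - buf.length = 1 := by omega
      rw [h3]; simp
    · have hc : ¬ (((buf ++ [s]).length : Int) ≥ m) := by
        rw [pvCond_iff m _ (by simp)]; simp; omega
      rw [pvStepA]; simp only [hc, if_false]
      rw [ih (buf ++ [s]) cs (by simp at h1 ⊢; omega) (by simp; omega)]
      have e1 : pvK m - (buf ++ [s]).length = pvK m - buf.length - 1 := by simp; omega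
      have e2 : (s :: rest).take (pvK m - buf.length) = s :: rest.take (pvK m - buf.length - 1) := by
        obtain ⟨j, hj⟩ : ∃ j, pvK m - buf.length = j + 1 := ⟨pvK m - buf.length - 1, by omega⟩
        rw [hj]; simp
      have e3 : (s :: rest).drop (pvK m - buf.length) = rest.drop (pvK m - buf.length - 1) := by
        obtain ⟨j, hj⟩ : ∃ j, pvK m - buf.length = j + 1 := ⟨pvK m - buf.length - 1, by omega⟩
        rw [hj]; simp
      rw [e1, e2, e3]; simp

-- A's loop state after the whole pass, in terms of B's groups
def pvTail (k : Nat) (g : List (List String)) : List String :=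
  if g ≠ [] ∧ (g.getLastD []).length < k then g.getLastD [] else []

def pvFulls (k : Nat) (g : List (List String)) : List (List String) :=
  if g ≠ [] ∧ (g.getLastD []).length < k then g.dropLast else g

theorem foldA_char (m : Int) : ∀ (xs : List String) (cs : List String),
    xs.foldl (pvStepA m) (cs, []) =
      (cs ++ (pvFulls (pvK m) (pvGroups (pvK m) xs)).map pvChunk,
       pvTail (pvK m) (pvGroups (pvK m) xs)) := by
  have hk := pvK_pos m
  have H : ∀ n (xs : List String), xs.length = n → ∀ cs,
      xs.foldl (pvStepA m) (cs, []) =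
        (cs ++ (pvFulls (pvK m) (pvGroups (pvK m) xs)).map pvChunk,
         pvTail (pvK m) (pvGroups (pvK m) xs)) := by
    intro n
    induction n using Nat.strong_induction_on with
    | _ n ihn =>
      intro xs hlen cs
      rcases eq_or_ne xs [] with rfl | hne
      · simp [pvGroups, pvFulls, pvTail]
      · by_cases hsmall : xs.length < pvK m
        · rw [foldA_small m xs [] cs (by simpa using hsmall)]
          have hg : pvGroups (pvK m) xs = [xs] := by
            rw [pvGroups_cons _ hk _ hne,
                List.take_of_length_le (by omega), List.drop_eq_nil_of_le (by omega)]
            simp [pvGroups]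
          rw [hg]
          have hxl : xs.length < pvK m := hsmall
          simp [pvFulls, pvTail, hxl]
        · rw [Nat.not_lt] at hsmall
          rw [foldA_fill m xs [] cs (by simpa using hsmall) (by simpa using hk)]
          simp only [List.length_nil, Nat.sub_zero, List.nil_append]
          have hdrop : (xs.drop (pvK m)).length < n := by
            rw [List.length_drop]; omega
          rw [ihn _ (by omega : (xs.drop (pvK m)).length < n) _ rfl]
          rw [pvGroups_cons _ hk _ hne]
          set g' := pvGroups (pvK m) (xs.drop (pvK m)) with hg'
          rcases eq_or_ne g' [] with hnil | hgne
          · have hde : xs.drop (pvK m) = [] := (pvGroups_nil_iff _ _).mp hnil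
            have htl : (xs.take (pvK m)).length = pvK m := by
              rw [List.length_take]; omega
            rw [hnil]
            simp [pvFulls, pvTail, htl, pvChunk]
          · have hLast : (xs.take (pvK m) :: g').getLastD [] = g'.getLastD [] := by
              rcases g' with _ | ⟨a, t⟩
              · exact absurd rfl hgne
              · simp [List.getLastD]
            have hDrop : (xs.take (pvK m) :: g').dropLast = xs.take (pvK m) :: g'.dropLast := by
              rcases g' with _ | ⟨a, t⟩
              · exact absurd rfl hgne
              · simp
            unfold pvFulls pvTail
            rw [hLast, hDrop]
            simp only [hgne, ne_eq, not_false_iff, true_and, List.cons_ne_nil]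
            split_ifs <;> simp
  intro xs cs; exact H xs.length xs rfl cs

-- setting the last element is dropLast ++ [new]
theorem pv_set_last {α : Type} (l : List α) (h : l ≠ []) (x : α) :
    l.set (l.length - 1) x = l.dropLast ++ [x] := by
  induction l with
  | nil => exact absurd rfl h
  | cons a t ih =>
    cases t with
    | nil => simp
    | cons b u =>
      simp only [List.length_cons, Nat.add_sub_cancel, List.set_cons_succ,
        List.dropLast_cons₂, List.cons_append]
      have := ih (by simp)
      simp only [List.length_cons, Nat.add_sub_cancel] at this
      rw [this]

theorem pv_getD_last {α : Type} [Inhabited α] (l : List α) (h : l ≠ []) (d : α) :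
    l.getD (l.length - 1) d = l.getLastD d := by
  induction l with
  | nil => exact absurd rfl h
  | cons a t ih =>
    cases t with
    | nil => simp
    | cons b u =>
      simp only [List.length_cons, Nat.add_sub_cancel, List.getD_cons_succ, List.getLastD_cons]
      have := ih (by simp)
      simp only [List.length_cons, Nat.add_sub_cancel] at this
      rw [this]
      rcases u with _ | _ <;> simp [List.getLastD]

theorem pv_main (sentences : List String) (mn mx : Int) :
    build_meaningful_chunks sentences mn mx = build_meaningful_chunks_alt sentences mn mx := by
  have hk := pvK_pos mx
  unfold build_meaningful_chunks build_meaningful_chunks_alt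
  have hstep : (if mx > 1 then mx else 1).toNat = pvK mx := rfl
  simp only [hstep]
  rw [foldA_char]
  dsimp only
  simp only [List.nil_append]
  refine congrArg _ ?_
  set g := pvGroups (pvK mx) sentences with hg
  rcases eq_or_ne g [] with hnil | hgne
  · rw [hnil]; simp [pvFulls, pvTail]
  · have hTlast : g.getLastD [] = g.getLast hgne := by
      rw [List.getLastD_eq_getLast?, List.getLast?_eq_some_getLast hgne, Option.getD_some]
    have hLgne : g.getLastD [] ≠ [] := by
      rw [hTlast]
      exact pvGroups_ne_nil _ hk sentences _ (hg ▸ List.getLast_mem hgne)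
    have hLg1 : 1 ≤ (g.getLastD []).length := List.length_pos_iff.mpr hLgne
    by_cases hpart : (g.getLastD []).length < pvK mx
    · -- A's final buf is the (short) last group
      have hTail : pvTail (pvK mx) g = g.getLastD [] := by
        unfold pvTail; rw [if_pos ⟨hgne, hpart⟩]
      have hFulls : pvFulls (pvK mx) g = g.dropLast := by
        unfold pvFulls; rw [if_pos ⟨hgne, hpart⟩]
      have hmaxlt' : ((g.getLastD []).length : Int) < mx := by
        have h1 := pvCond_iff mx (g.getLastD []).length hLg1
        unfold pvK at h1 hpart
        split_ifs at h1 hpart <;> omega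
      rw [hTail, hFulls, if_pos hLgne]
      set T := g.getLastD [] with hT
      set C := List.map pvChunk g.dropLast with hC
      have hgsplit : g = g.dropLast ++ [T] := by
        rw [hTlast]; exact (List.dropLast_append_getLast hgne).symm
      have hmapg : List.map pvChunk g = C ++ [pvChunk T] := by
        conv_lhs => rw [hgsplit]
        rw [List.map_append, List.map_singleton, hC]
      rcases Nat.lt_or_ge 1 g.length with h2 | h1len
      · -- at least two groups
        have hFne : g.dropLast ≠ [] := by
          intro hcon
          have := List.length_dropLast (xs := g)
          rw [hcon] at this; simp at this; omega
        have hCne : C ≠ [] := by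
          rw [hC]; intro hcon; exact hFne (List.map_eq_nil_iff.mp hcon)
        by_cases hmin : ((T.length : Int) < mn)
        · -- merge case on both sides
          rw [if_pos ⟨hCne, hmin⟩, if_pos ⟨h2, hmaxlt', hmin⟩]
          rw [pv_set_last C hCne, hmapg]
          have hlen : (C ++ [pvChunk T]).length - 2 = C.length - 1 := by
            rw [List.length_append, List.length_singleton]; omega
          rw [hlen]
          have htake : (C ++ [pvChunk T]).take (C.length - 1) = C.dropLast := by
            rw [List.take_append_of_le_length (by omega), List.dropLast_eq_take]
          have hgetD : (C ++ [pvChunk T]).getD (C.length - 1) "" = C.getLastD "" := by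
            rw [List.getD_append _ _ _ _ (by
              have : 1 ≤ C.length := List.length_pos_iff.mpr hCne
              omega)]
            exact pv_getD_last C hCne ""
          rw [htake, hgetD]
        · -- tail short but not below min: A appends it as its own chunk, B keeps all groups
          rw [if_neg (by intro hcon; exact hmin hcon.2),
              if_neg (by intro hcon; exact hmin hcon.2.2), hmapg]
      · -- a single (short) group: A appends to empty chunks, B skips the merge
        have hg1 : g.length = 1 := by
          have : 1 ≤ g.length := List.length_pos_iff.mpr hgne
          omega
        have hdl : g.dropLast = [] := List.eq_nil_of_length_eq_zero (by
          rw [List.length_dropLast, hg1])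
        rw [if_neg (by
              intro hcon
              exact absurd hcon.1 (by rw [hC, hdl]; simp)),
            if_neg (by intro hcon; omega), hmapg, hC, hdl]
    · -- last group full: A's buf is empty and neither side merges
      have hTail : pvTail (pvK mx) g = [] := by
        unfold pvTail; rw [if_neg (by intro hcon; exact hpart hcon.2)]
      have hFulls : pvFulls (pvK mx) g = g := by
        unfold pvFulls; rw [if_neg (by intro hcon; exact hpart hcon.2)]
      have hnmax : ¬ ((g.getLastD []).length : Int) < mx := by
        have := (pvCond_iff mx (g.getLastD []).length hLg1).mpr (by omega)
        omega
      rw [hTail, hFulls, if_neg (by simp), if_neg (by intro hcon; exact hnmax hcon.2.1)]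

-- ===== VERDICT (by name: the statement is the Claim_ definition above) =====
theorem build_meaningful_chunks_spec : Claim_equal_build_meaningful_chunks := by
  intro sentences mn mx _
  unfold Spec_build_meaningful_chunks
  exact pv_main sentences mn mx
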